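-- pv_equiv track=rewrite | github.com/millotp/adventofcode2023 | python/day14.py | shift_south
-- ===== SOURCE A (Python) =====
-- def shift_south(G):
--   for i in range(len(G[0])):
--     last_free = len(G) - 1
--     for j in range(len(G) - 1, -1, -1):
--       if G[j][i] == '#':
--         last_free = j - 1
--       if G[j][i] == 'O':
--         if last_free != j:
--           G[last_free][i] = 'O'
--           G[j][i] = '.'
--         last_free -= 1
--   return G
-- ===== SOURCE B (Python) =====
-- def _settle(seg):
--     k = seg.count('O')
--     return ['.' if c == 'O' else c for c in seg[:len(seg) - k]] + ['O'] * k
--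
--
-- def shift_south(G):
--     for i in range(len(G[0])):
--         new = []
--         seg = []
--         for row in G:
--             c = row[i]
--             if c == '#':
--                 new += _settle(seg)
--                 new.append('#')
--                 seg = []
--             else:
--                 seg.append(c)
--         new += _settle(seg)
--         for row, c in zip(G, new):
--             row[i] = c
--     return G
-- ===== Notes on version B (the rewrite author's own statement) =====
-- stated objective: alternative
-- what changed: A sweeps each column bottom-up with a moving last_free write pointer and in-place swaps; B instead splits each column at '#' walls, rewrites every wall-free run as its non-'O' cells (O's blanked) followed by that run's count of 'O's, and writes the rebuilt column back in one pass.
-- outside the precondition, e.g. on shift_south([]): A raises IndexError, B raises IndexError; on shift_south([['O', '.'], ['.']]): A raises IndexError, B raises IndexError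
import Mathlib
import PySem

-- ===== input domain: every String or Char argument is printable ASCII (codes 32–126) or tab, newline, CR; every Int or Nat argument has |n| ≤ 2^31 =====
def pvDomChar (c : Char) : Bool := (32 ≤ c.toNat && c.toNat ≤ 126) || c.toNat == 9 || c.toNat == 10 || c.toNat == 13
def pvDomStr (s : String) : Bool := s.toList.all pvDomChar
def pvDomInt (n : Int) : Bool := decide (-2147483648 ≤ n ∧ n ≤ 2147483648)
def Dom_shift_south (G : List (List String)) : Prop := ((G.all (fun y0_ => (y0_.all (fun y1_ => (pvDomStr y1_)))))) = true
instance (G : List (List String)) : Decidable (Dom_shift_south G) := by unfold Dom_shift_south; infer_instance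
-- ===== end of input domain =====

-- B re-implements the southward rock shift per column by splitting each column at '#'
-- walls and settling each wall-free run at once (objective: alternative decomposition,
-- same cost). Both Pythons mutate the grid rows in place; the equivalence proved here is
-- about the returned value.

-- ===== PORT A =====
-- G[j][i] read: indices produced by A's loops are nonnegative and, inside Pre_, in range
-- (getD with toNat is exact there; outside Pre_ Python raises IndexError).
def aGet (g : List (List String)) (j i : Int) : String :=
  (g.getD j.toNat []).getD i.toNat ""

-- G[j][i] = v : fetch row j, set cell i, store row back (exact inside Pre_).
def aSet (g : List (List String)) (j i : Int) (v : String) : List (List String) :=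
  g.set j.toNat ((g.getD j.toNat []).set i.toNat v)

-- the body of A's inner loop (state: grid, last_free)
def gstep (i : Int) (st : List (List String) × Int) (j : Int) : List (List String) × Int :=
  let lf := if aGet st.1 j i == "#" then j - 1 else st.2
  if aGet st.1 j i == "O" then
    if lf ≠ j then (aSet (aSet st.1 lf i "O") j i ".", lf - 1) else (st.1, lf - 1)
  else (st.1, lf)

def shift_south (G : List (List String)) : List (List String) :=
  (PySem.List.pyRange 0 (((G.headD []).length : Int)) 1).foldl (fun g i =>
    ((PySem.List.pyRange (((g.length : Int)) - 1) (-1) (-1)).foldl (gstep i)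
      (g, ((g.length : Int)) - 1)).1) G

-- ===== PORT B =====
-- settle one wall-free run: non-'O' cells keep their place at the top, all 'O's sink to the bottom
def settleB (seg : List String) : List String :=
  (seg.take (seg.length - seg.count "O")).map (fun c => if c == "O" then "." else c)
    ++ List.replicate (seg.count "O") "O"

-- body of B's per-column scan (state: finished part of the new column, current run)
def bRead (i : Int) (st : List String × List String) (row : List String) : List String × List String :=
  let c := row.getD i.toNat ""
  if c == "#" then (st.1 ++ settleB st.2 ++ ["#"], []) else (st.1, st.2 ++ [c])

def shift_south_alt (G : List (List String)) : List (List String) :=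
  (PySem.List.pyRange 0 (((G.headD []).length : Int)) 1).foldl (fun g i =>
    let p := g.foldl (bRead i) ([], [])
    List.zipWith (fun row c => row.set i.toNat c) g (p.1 ++ settleB p.2)) G

-- ===== PRECONDITION & SPEC =====
-- Pre_: exactly where Python A returns — a nonempty grid whose rows are all at least as
-- long as row 0 (otherwise A raises IndexError).
def Pre_shift_south (G : List (List String)) : Prop :=
  G ≠ [] ∧ ∀ row ∈ G, (G.headD []).length ≤ row.length
instance (G : List (List String)) : Decidable (Pre_shift_south G) := by
  unfold Pre_shift_south; infer_instance

def pvWitness_shift_south : List (List String) := [["O", "."], [".", "#"]]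

def Spec_shift_south (G : List (List String)) (out : List (List String)) : Prop := out = shift_south_alt G
instance (G : List (List String)) (out : List (List String)) : Decidable (Spec_shift_south G out) := by unfold Spec_shift_south; infer_instance

-- ===== CLAIM (what is proved, stated in full; the proofs are below) =====
def Claim_equal_shift_south : Prop := ∀ (G : List (List String)), Dom_shift_south G → Pre_shift_south G → Spec_shift_south G (shift_south G)

-- ===== LEMMAS AND PROOFS =====

-- proof-side pure column machine mirroring A's inner loop on one column
def colStep (st : List String × Int) (j : Int) : List String × Int :=
  let lf := if st.1.getD j.toNat "" == "#" then j - 1 else st.2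
  if st.1.getD j.toNat "" == "O" then
    if lf ≠ j then ((st.1.set lf.toNat "O").set j.toNat ".", lf - 1) else (st.1, lf - 1)
  else (st.1, lf)

-- proof-side structural form of B's column rebuild
def buildCol : List String → List String → List String
  | [], seg => settleB seg
  | c :: rest, seg => if c == "#" then settleB seg ++ "#" :: buildCol rest [] else buildCol rest (seg ++ [c])

def bStep (st : List String × List String) (c : String) : List String × List String :=
  if c == "#" then (st.1 ++ settleB st.2 ++ ["#"], []) else (st.1, st.2 ++ [c])

def setCol (g : List (List String)) (i : Nat) (c : List String) : List (List String) :=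
  List.zipWith (fun row x => row.set i x) g c

def getCol (g : List (List String)) (i : Nat) : List String :=
  g.map (fun row => row.getD i "")

theorem settleB_nil : settleB [] = [] := rfl

theorem settleB_length (s : List String) : (settleB s).length = s.length := by
  have h := List.count_le_length (a := "O") (l := s)
  simp [settleB]
  omega

theorem settleB_cons_other {c : String} (t : List String) (h : (c == "O") = false) :
    settleB (c :: t) = c :: settleB t := by
  have hk := List.count_le_length (a := "O") (l := t)
  have hne : ¬ c = "O" := by simpa using h
  unfold settleB
  rw [show (c :: t).count "O" = t.count "O" by simp [List.count_cons, h]]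
  rw [show (c :: t).length - t.count "O" = (t.length - t.count "O") + 1 from by simp; omega]
  rw [List.take_succ_cons, List.map_cons]
  simp [h]

theorem settleB_cons_O_full (t : List String) (h : t.count "O" = t.length) :
    settleB ("O" :: t) = "O" :: settleB t := by
  have h2 : ("O" :: t).length - ("O" :: t).count "O" = 0 := by
    simp [List.count_cons]; omega
  have h3 : t.length - t.count "O" = 0 := by omega
  unfold settleB
  rw [h2, h3]
  simp [List.count_cons, List.replicate_succ]

theorem settleB_cons_O (t : List String) (h : t.count "O" < t.length) :
    settleB ("O" :: t) = "." :: (settleB t).set (t.length - t.count "O" - 1) "O" := by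
  have hk := List.count_le_length (a := "O") (l := t)
  unfold settleB
  rw [show ("O" :: t).count "O" = t.count "O" + 1 by simp [List.count_cons]]
  rw [show ("O" :: t).length - (t.count "O" + 1) = (t.length - t.count "O" - 1) + 1 from by
    simp; omega]
  rw [List.take_succ_cons, List.map_cons]
  have hlen : (List.map (fun c => if c == "O" then "." else c)
      (t.take (t.length - t.count "O"))).length = t.length - t.count "O" := by
    simp [List.length_take]
  rw [List.set_append_left _ _ (by rw [hlen]; omega)]
  rw [List.set_eq_take_cons_drop _ (by rw [hlen]; omega)]
  rw [List.drop_eq_nil_of_le (by rw [hlen]; omega)]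
  rw [← List.map_take, List.take_take]
  rw [show min (t.length - t.count "O" - 1) (t.length - t.count "O") = t.length - t.count "O" - 1 from by omega]
  simp [List.replicate_succ]

theorem bc_accum (t : List String) (ht : ∀ c ∈ t, (c == "#") = false) :
    ∀ seg s, buildCol (t ++ s) seg = buildCol s (seg ++ t) := by
  induction t with
  | nil => simp [buildCol]
  | cons c rest ih =>
    intro seg s
    have hc : (c == "#") = false := ht c (by simp)
    simp only [List.cons_append, buildCol, hc, Bool.false_eq_true, if_false]
    rw [ih (fun x hx => ht x (by simp [hx])) (seg ++ [c]) s]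
    simp

theorem bc_shape (r : List String) (hr : r = [] ∨ ∃ r', r = "#" :: r') (t : List String) :
    buildCol r t = settleB t ++ buildCol r [] := by
  rcases hr with rfl | ⟨r', rfl⟩
  · simp [buildCol, settleB_nil]
  · simp [buildCol, settleB_nil]

theorem buildCol_length (col : List String) : ∀ seg, (buildCol col seg).length = col.length + seg.length := by
  induction col with
  | nil => intro seg; simp [buildCol, settleB_length]
  | cons c rest ih =>
    intro seg
    by_cases hc : (c == "#") = true
    · simp [buildCol, hc, settleB_length, ih]; omega
    · simp only [buildCol, hc, Bool.false_eq_true, if_false]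
      rw [ih (seg ++ [c])]
      simp; omega

theorem getD_append_add {α : Type} (a : List α) (z : List α) (m : Nat) (d : α) :
    (a ++ z).getD (a.length + m) d = z.getD m d := by
  induction a with
  | nil => simp
  | cons x xs ih => simpa [Nat.succ_add] using ih

theorem set_append_add {α : Type} (a : List α) (z : List α) (m : Nat) (v : α) :
    (a ++ z).set (a.length + m) v = a ++ z.set m v := by
  induction a with
  | nil => simp
  | cons x xs ih => simpa [Nat.succ_add] using ih

theorem colStep_len (c : List String) (lf j : Int) : ((colStep (c, lf) j).1).length = c.length := by
  unfold colStep
  split_ifs <;> simp <;> split_ifs <;> simp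

theorem L_foldB (col : List String) : ∀ acc seg,
    (col.foldl bStep (acc, seg)).1 ++ settleB (col.foldl bStep (acc, seg)).2 = acc ++ buildCol col seg := by
  induction col with
  | nil => intro acc seg; simp [buildCol]
  | cons c rest ih =>
    intro acc seg
    by_cases hc : (c == "#") = true
    · simp only [List.foldl_cons, bStep, hc, if_true, buildCol, ih]
      simp
    · simp only [List.foldl_cons, bStep, hc, Bool.false_eq_true, if_false, buildCol, ih]

theorem setCol_getD (i : Nat) : ∀ (g : List (List String)) (c : List String),
    c.length = g.length → (∀ row ∈ g, i < row.length) → ∀ (j : Nat),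
    ((setCol g i c).getD j []).getD i "" = c.getD j "" := by
  intro g
  induction g with
  | nil =>
    intro c hl _ j
    have : c = [] := List.length_eq_zero_iff.mp (by simpa using hl)
    subst this; simp [setCol]
  | cons row gs ih =>
    intro c hl hrow j
    cases c with
    | nil => simp at hl
    | cons x cs =>
      cases j with
      | zero =>
        have hi : i < row.length := hrow row (by simp)
        simp only [setCol, List.zipWith_cons_cons, List.getD_cons_zero]
        rw [List.getD_eq_getElem _ _ (by simpa using hi)]
        simp
      | succ j =>
        simp only [setCol, List.zipWith_cons_cons, List.getD_cons_succ]
        exact ih cs (by simpa using hl) (fun r hr => hrow r (by simp [hr])) j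

theorem setCol_set (i : Nat) : ∀ (g : List (List String)) (c : List String),
    c.length = g.length → ∀ (j : Nat) (v : String),
    (setCol g i c).set j (((setCol g i c).getD j []).set i v) = setCol g i (c.set j v) := by
  intro g
  induction g with
  | nil => intro c hl j v; simp [setCol]
  | cons row gs ih =>
    intro c hl j v
    cases c with
    | nil => simp at hl
    | cons x cs =>
      cases j with
      | zero => simp [setCol, List.set_set]
      | succ j =>
        have h2 := ih cs (by simpa using hl) j v
        simp only [setCol] at h2 ⊢
        simp only [List.zipWith_cons_cons, List.getD_cons_succ, List.set_cons_succ, h2]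

theorem setCol_getCol (i : Nat) : ∀ (g : List (List String)),
    (∀ row ∈ g, i < row.length) → setCol g i (getCol g i) = g := by
  intro g
  induction g with
  | nil => intro _; simp [setCol, getCol]
  | cons row gs ih =>
    intro hrow
    have hi : i < row.length := hrow row (by simp)
    simp only [setCol, getCol, List.map_cons, List.zipWith_cons_cons]
    rw [List.getD_eq_getElem _ _ hi, List.set_getElem_self hi]
    have := ih (fun r hr => hrow r (by simp [hr]))
    simp only [setCol, getCol] at this
    rw [this]

theorem gstep_setCol (i : Int) (g : List (List String)) (c : List String)
    (hl : c.length = g.length) (hrow : ∀ row ∈ g, i.toNat < row.length) (lf j : Int) :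
    gstep i (setCol g i.toNat c, lf) j = (setCol g i.toNat (colStep (c, lf) j).1, (colStep (c, lf) j).2) := by
  have hg := setCol_getD i.toNat g c hl hrow j.toNat
  unfold gstep colStep aGet aSet
  simp only [hg]
  by_cases hO : (c.getD j.toNat "" == "O") = true
  · simp only [hO, if_true]
    by_cases hne : (if c.getD j.toNat "" == "#" then j - 1 else lf) ≠ j
    · simp only [if_pos hne]
      rw [setCol_set i.toNat g c hl _ "O"]
      rw [setCol_set i.toNat g _ (by simp [hl]) j.toNat "."]
    · simp only [if_neg hne]
  · simp only [hO, Bool.false_eq_true, if_false]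

theorem grid_fold (i : Int) (g : List (List String)) (hrow : ∀ row ∈ g, i.toNat < row.length) :
    ∀ (js : List Int) (c : List String), c.length = g.length → ∀ (lf : Int),
    js.foldl (gstep i) (setCol g i.toNat c, lf)
      = (setCol g i.toNat (js.foldl colStep (c, lf)).1, (js.foldl colStep (c, lf)).2) := by
  intro js
  induction js with
  | nil => intro c _ lf; rfl
  | cons j js ih =>
    intro c hl lf
    simp only [List.foldl_cons]
    rw [gstep_setCol i g c hl hrow lf j]
    exact ih (colStep (c, lf) j).1 (by rw [colStep_len]; exact hl) (colStep (c, lf) j).2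

theorem colA_inv : ∀ (pre t r : List String), (∀ c ∈ t, (c == "#") = false) →
    (r = [] ∨ ∃ r', r = "#" :: r') →
    ((PySem.List.pyRange ((pre.length : Int) - 1) (-1) (-1)).foldl colStep
       (pre ++ settleB t ++ buildCol r [],
        (pre.length : Int) + ((t.length - t.count "O" : Nat) : Int) - 1)).1
      = buildCol (pre ++ (t ++ r)) [] := by
  intro pre
  induction pre using List.reverseRecOn with
  | nil =>
    intro t r ht hr
    rw [show ((([] : List String).length : Int)) - 1 = -1 by simp]
    rw [PySem.List.pyRange_neg_one_eq_nil (by norm_num)]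
    simp only [List.foldl_nil, List.nil_append]
    rw [bc_accum t ht [] r, List.nil_append, bc_shape r hr t]
  | append_singleton pre c ih =>
    intro t r ht hr
    have hk := List.count_le_length (a := "O") (l := t)
    rw [show (((pre ++ [c]).length : Int)) - 1 = (pre.length : Int) by simp]
    rw [PySem.List.pyRange_neg_one_cons (by omega)]
    rw [List.foldl_cons]
    have hcur : (pre ++ [c]) ++ settleB t ++ buildCol r []
        = pre ++ (c :: (settleB t ++ buildCol r [])) := by simp
    rw [hcur]
    have htn : ((pre.length : Int)).toNat = pre.length := by simp
    have hread : (pre ++ (c :: (settleB t ++ buildCol r []))).getD pre.length "" = c := by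
      simpa using getD_append_add pre (c :: (settleB t ++ buildCol r [])) 0 ""
    by_cases hH : (c == "#") = true
    · have hc : c = "#" := by simpa using hH
      have hstep : colStep (pre ++ (c :: (settleB t ++ buildCol r [])),
            ((pre ++ [c]).length : Int) + ((t.length - t.count "O" : Nat) : Int) - 1) (pre.length : Int)
          = (pre ++ settleB [] ++ buildCol ("#" :: (t ++ r)) [],
             (pre.length : Int) + ((([] : List String).length - ([] : List String).count "O" : Nat) : Int) - 1) := by
        unfold colStep
        simp only [htn, hread, hH, if_true, hc]
        rw [if_neg (by simp)]
        rw [Prod.mk.injEq]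
        refine ⟨?_, ?_⟩
        · rw [show buildCol ("#" :: (t ++ r)) [] = settleB [] ++ "#" :: buildCol (t ++ r) [] by
            simp [buildCol]]
          rw [bc_accum t ht [] r, List.nil_append, bc_shape r hr t]
          simp [settleB_nil]
        · simp
      rw [hstep, ih [] ("#" :: (t ++ r)) (by simp) (Or.inr ⟨t ++ r, rfl⟩)]
      congr 1
      simp [hc]
    · by_cases hO : (c == "O") = true
      · have hc : c = "O" := by simpa using hO
        by_cases hF : t.length - t.count "O" = 0
        · have hkn : t.count "O" = t.length := by omega
          have hstep : colStep (pre ++ (c :: (settleB t ++ buildCol r [])),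
                ((pre ++ [c]).length : Int) + ((t.length - t.count "O" : Nat) : Int) - 1) (pre.length : Int)
              = (pre ++ settleB ("O" :: t) ++ buildCol r [],
                 (pre.length : Int) + ((("O" :: t).length - ("O" :: t).count "O" : Nat) : Int) - 1) := by
            unfold colStep
            simp only [htn, hread, hH, Bool.false_eq_true, if_false, hO, if_true]
            rw [if_neg (by simp [hF])]
            rw [Prod.mk.injEq]
            refine ⟨?_, ?_⟩
            · rw [settleB_cons_O_full t hkn]; simp [hc]
            · have h1 : ("O" :: t).count "O" = t.count "O" + 1 := by simp [List.count_cons]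
              rw [h1]; simp; omega
          rw [hstep, ih ("O" :: t) r
            (fun x hx' => by
              rcases List.mem_cons.mp hx' with h | h
              · subst h; decide
              · exact ht x h) hr]
          congr 1
          simp [hc]
        · have hstep : colStep (pre ++ (c :: (settleB t ++ buildCol r [])),
                ((pre ++ [c]).length : Int) + ((t.length - t.count "O" : Nat) : Int) - 1) (pre.length : Int)
              = (pre ++ settleB ("O" :: t) ++ buildCol r [],
                 (pre.length : Int) + ((("O" :: t).length - ("O" :: t).count "O" : Nat) : Int) - 1) := by
            unfold colStep
            simp only [htn, hread, hH, Bool.false_eq_true, if_false, hO, if_true]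
            rw [if_pos (by simp; omega)]
            rw [Prod.mk.injEq]
            refine ⟨?_, ?_⟩
            · have htn2 : (((pre ++ [c]).length : Int) + ((t.length - t.count "O" : Nat) : Int) - 1).toNat
                  = pre.length + (t.length - t.count "O") := by simp; omega
              rw [htn2]
              rw [set_append_add pre (c :: (settleB t ++ buildCol r [])) (t.length - t.count "O") "O"]
              rw [show t.length - t.count "O" = (t.length - t.count "O" - 1) + 1 by omega]
              rw [List.set_cons_succ]
              rw [List.set_append_left (s := settleB t) (t := buildCol r [])
                (t.length - t.count "O" - 1) "O" (by rw [settleB_length]; omega)]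
              have h0 := set_append_add pre
                (c :: ((settleB t).set (t.length - t.count "O" - 1) "O" ++ buildCol r [])) 0 "."
              simp only [Nat.add_zero] at h0
              rw [h0]
              rw [settleB_cons_O t (by omega)]
              simp
            · have h1 : ("O" :: t).count "O" = t.count "O" + 1 := by simp [List.count_cons]
              rw [h1]; simp; omega
          rw [hstep, ih ("O" :: t) r
            (fun x hx' => by
              rcases List.mem_cons.mp hx' with h | h
              · subst h; decide
              · exact ht x h) hr]
          congr 1
          simp [hc]
      · have hstep : colStep (pre ++ (c :: (settleB t ++ buildCol r [])),
              ((pre ++ [c]).length : Int) + ((t.length - t.count "O" : Nat) : Int) - 1) (pre.length : Int)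
            = (pre ++ settleB (c :: t) ++ buildCol r [],
               (pre.length : Int) + (((c :: t).length - (c :: t).count "O" : Nat) : Int) - 1) := by
          unfold colStep
          simp only [htn, hread, hH, Bool.false_eq_true, if_false, hO]
          rw [Prod.mk.injEq]
          refine ⟨?_, ?_⟩
          · rw [settleB_cons_other t (by simpa using hO)]; simp
          · have h1 : (c :: t).count "O" = t.count "O" := by
              rw [List.count_cons]
              simp [hO]
            rw [h1]; simp; omega
        rw [hstep, ih (c :: t) r
          (fun x hx' => by
            rcases List.mem_cons.mp hx' with h | h
            · subst h; simpa using hH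
            · exact ht x h) hr]
        congr 1
        simp

theorem step_eq (g : List (List String)) (i : Int) (hrow : ∀ row ∈ g, i.toNat < row.length) :
    ((PySem.List.pyRange ((g.length : Int) - 1) (-1) (-1)).foldl (gstep i) (g, (g.length : Int) - 1)).1
      = List.zipWith (fun row c => row.set i.toNat c) g
          ((g.foldl (bRead i) ([], [])).1 ++ settleB (g.foldl (bRead i) ([], [])).2) := by
  have hl : (getCol g i.toNat).length = g.length := by simp [getCol]
  have hg : setCol g i.toNat (getCol g i.toNat) = g := setCol_getCol i.toNat g hrow
  have hb : g.foldl (bRead i) (([] : List String), ([] : List String))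
      = (getCol g i.toNat).foldl bStep ([], []) := by
    simp only [getCol, List.foldl_map]
    rfl
  have hbuild := L_foldB (getCol g i.toNat) [] []
  have hcol := colA_inv (getCol g i.toNat) [] [] (by simp) (Or.inl rfl)
  simp only [buildCol, settleB_nil, List.append_nil, List.length_nil, List.count_nil,
    Nat.sub_zero, Nat.cast_zero, add_zero] at hcol
  conv_lhs => rw [show ((g, (g.length : Int) - 1))
    = (setCol g i.toNat (getCol g i.toNat), (g.length : Int) - 1) by rw [hg]]
  rw [grid_fold i g hrow (PySem.List.pyRange ((g.length : Int) - 1) (-1) (-1))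
    (getCol g i.toNat) hl ((g.length : Int) - 1)]
  rw [show ((g.length : Int)) = ((getCol g i.toNat).length : Int) by rw [hl]]
  rw [hcol, hb, hbuild]
  simp only [List.nil_append, List.append_nil]
  rfl

theorem lens_zip (i : Nat) : ∀ (g : List (List String)) (nw : List String),
    nw.length = g.length →
    (List.zipWith (fun row c => row.set i c) g nw).map List.length = g.map List.length := by
  intro g
  induction g with
  | nil => intro nw _; simp
  | cons row gs ih =>
    intro nw hlen
    cases nw with
    | nil => simp at hlen
    | cons x xs =>
      simp only [List.zipWith_cons_cons, List.map_cons, List.length_set]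
      rw [ih xs (by simpa using hlen)]

theorem nw_len (g : List (List String)) (i : Int) :
    ((g.foldl (bRead i) ([], [])).1 ++ settleB (g.foldl (bRead i) ([], [])).2).length = g.length := by
  have hb : g.foldl (bRead i) (([] : List String), ([] : List String))
      = (getCol g i.toNat).foldl bStep ([], []) := by
    simp only [getCol, List.foldl_map]
    rfl
  rw [hb, L_foldB (getCol g i.toNat) [] []]
  simp [buildCol_length, getCol]

theorem outer : ∀ (js : List Int) (g : List (List String)),
    (∀ i ∈ js, ∀ row ∈ g, i.toNat < row.length) →
    js.foldl (fun g i =>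
        ((PySem.List.pyRange ((g.length : Int) - 1) (-1) (-1)).foldl (gstep i) (g, (g.length : Int) - 1)).1) g
      = js.foldl (fun g i =>
          let p := g.foldl (bRead i) ([], [])
          List.zipWith (fun row c => row.set i.toNat c) g (p.1 ++ settleB p.2)) g := by
  intro js
  induction js with
  | nil => intro g _; rfl
  | cons i js ih =>
    intro g h
    simp only [List.foldl_cons]
    rw [step_eq g i (h i (by simp))]
    apply ih
    intro i' hi' row' hrow'
    have hlen := nw_len g i
    have hmap := lens_zip i.toNat g _ hlen
    have hmem : row'.length ∈ (List.zipWith (fun row c => row.set i.toNat c) g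
        ((g.foldl (bRead i) ([], [])).1 ++ settleB (g.foldl (bRead i) ([], [])).2)).map List.length :=
      List.mem_map_of_mem hrow'
    rw [hmap] at hmem
    obtain ⟨row, hrowg, hlen'⟩ := List.mem_map.mp hmem
    rw [← hlen']
    exact h i' (by simp [hi']) row hrowg

-- ===== VERDICT (by name: the statement is the Claim_ definition above) =====
theorem shift_south_spec : Claim_equal_shift_south := by
  intro G _ hpre
  unfold Spec_shift_south shift_south shift_south_alt
  apply outer
  intro i hi row hr
  have h1 := (PySem.List.mem_pyRange_one).mp hi
  have h2 := hpre.2 row hr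
  omega
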